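-- pv_equiv track=rewrite | github.com/rheft/advent-of-code-2020 | day06/day6.py | all_answered
-- ===== SOURCE A (Python) =====
-- def all_answered(answer_string: str) -> int:
--     """Return count of answers that everyone agreed on."""
--     num_groups = len(answer_string.split(" ")) - 1 # remove leading space
--     letter_counts = dict()
--     count_letter_in_all = 0
--
--     for group in answer_string.split(" "):
--         if group == "":
--             continue
--         for letter in set(group):
--             letter_counts[letter] = letter_counts.get(letter, 0) + 1
--             if letter_counts[letter] == num_groups:
--                 count_letter_in_all += 1
--
--     return count_letter_in_all
-- ===== SOURCE B (Python) =====
-- def all_answered(answer_string: str) -> int: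
--     """Return count of answers that everyone agreed on."""
--     groups = answer_string.split(" ")
--     num_groups = len(groups) - 1  # remove leading space
--     if num_groups < 1:
--         return 0
--     return sum(
--         sum(letter in group for group in groups) >= num_groups
--         for letter in set("".join(groups))
--     )
-- ===== Notes on version B (the rewrite author's own statement) =====
-- stated objective: alternative
-- what changed: A builds a per-letter tally dict group-by-group and bumps its counter the moment a letter's tally reaches num_groups; B keeps no dict at all: it iterates letter-major over the distinct letters of the string and, for each letter, counts by membership scans how many groups contain it, comparing against num_groups (guarding num_groups < 1, which A's counting makes return 0).
import Mathlib
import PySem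

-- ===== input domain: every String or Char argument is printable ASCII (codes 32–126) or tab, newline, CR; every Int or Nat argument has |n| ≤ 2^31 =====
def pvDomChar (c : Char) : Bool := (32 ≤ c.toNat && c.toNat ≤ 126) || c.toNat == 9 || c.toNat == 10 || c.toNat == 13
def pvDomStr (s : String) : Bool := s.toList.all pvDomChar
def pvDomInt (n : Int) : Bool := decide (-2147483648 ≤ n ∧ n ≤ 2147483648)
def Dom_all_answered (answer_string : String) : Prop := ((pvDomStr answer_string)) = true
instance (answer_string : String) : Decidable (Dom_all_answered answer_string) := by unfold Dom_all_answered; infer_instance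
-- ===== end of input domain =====

-- B drops A's dict tally entirely: it loops letter-major over the distinct letters and counts, per letter, the groups containing it (alternative decomposition; same return value).

-- ===== PORT A =====
def all_answered (answer_string : String) : Int :=
  let groups := (PySem.Str.split? answer_string " ").getD []   -- sep " " ≠ "": split? is always some
  let num_groups : Int := (groups.length : Int) - 1
  let st := groups.foldl (fun (st : PySem.Dict Char Int × Int) group =>
      if group = "" then st
      else (PySem.Set.ofList group.toList).foldl (fun st letter =>
        let v := st.1.getD letter 0 + 1
        (st.1.insert letter v, if v = num_groups then st.2 + 1 else st.2)) st)
    (PySem.Dict.empty, 0)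
  st.2

-- ===== PORT B =====
def all_answered_alt (answer_string : String) : Int :=
  let groups := (PySem.Str.split? answer_string " ").getD []   -- sep " " ≠ "": split? is always some
  let num_groups : Int := (groups.length : Int) - 1
  if num_groups < 1 then 0
  else
    -- sum(sum(letter in group for group in groups) >= num_groups for letter in set("".join(groups)))
    -- 'letter in group' on a 1-char needle is Python substring search: PySem.Chars.isIn [letter]
    (PySem.Set.ofList (PySem.Str.join "" groups).toList).foldl
      (fun (acc : Int) letter =>
        if num_groups ≤ groups.foldl
            (fun (c : Int) group => if PySem.Chars.isIn [letter] group.toList then c + 1 else c) 0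
        then acc + 1 else acc) 0

-- ===== PRECONDITION & SPEC =====
def Spec_all_answered (answer_string : String) (out : Int) : Prop := out = all_answered_alt answer_string
instance (answer_string : String) (out : Int) : Decidable (Spec_all_answered answer_string out) := by unfold Spec_all_answered; infer_instance

-- ===== CLAIM (what is proved, stated in full; the proofs are below) =====
def Claim_equal_all_answered : Prop := ∀ (answer_string : String), Dom_all_answered answer_string → Spec_all_answered answer_string (all_answered answer_string)

-- ===== LEMMAS AND PROOFS =====

-- A's per-letter step, with threshold n
def pvStepA (n : Int) (st : PySem.Dict Char Int × Int) (letter : Char) : PySem.Dict Char Int × Int :=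
  let v := st.1.getD letter 0 + 1
  (st.1.insert letter v, if v = n then st.2 + 1 else st.2)

-- the counter step (A's dict component; foldl of it from empty IS PySem.Dict.counter, definitionally)
def pvStepB (d : PySem.Dict Char Int) (letter : Char) : PySem.Dict Char Int :=
  d.insert letter (d.getD letter 0 + 1)

-- number of tallied values ≥ n
def pvCountGE (n : Int) (d : PySem.Dict Char Int) : Int :=
  ((d.values.filter (fun c => decide (n ≤ c))).length : Int)

theorem pvCountGE_eq_countP (n : Int) (d : PySem.Dict Char Int) (h : d.keys.Nodup) :
    pvCountGE n d = (d.keys.countP (fun k => decide (n ≤ d.getD k 0)) : Int) := by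
  unfold pvCountGE
  rw [PySem.Dict.values_eq_map_keys d h 0, ← List.countP_eq_length_filter, List.countP_map]
  rfl

-- one tally step moves pvCountGE by exactly A's increment (needs 1 ≤ n)
theorem pvCountGE_step (n : Int) (hn : 1 ≤ n) (d : PySem.Dict Char Int) (h : d.keys.Nodup) (l : Char) :
    pvCountGE n (pvStepB d l) = pvCountGE n d + (if d.getD l 0 + 1 = n then 1 else 0) := by
  have h' : (pvStepB d l).keys.Nodup := PySem.Dict.nodup_keys_insert d l _ h
  rw [pvCountGE_eq_countP n _ h', pvCountGE_eq_countP n d h]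
  unfold pvStepB
  cases hc : d.contains l with
  | true =>
    have hk := PySem.Dict.keys_insert_of_contains d (d.getD l 0 + 1) hc
    have hmem : l ∈ d.keys := (PySem.Dict.contains_iff_mem_keys d l).mp hc
    have hperm := List.perm_cons_erase hmem
    rw [hk]
    rw [(hperm).countP_eq (fun k => decide (n ≤ (d.insert l (d.getD l 0 + 1)).getD k 0)),
        (hperm).countP_eq (fun k => decide (n ≤ d.getD k 0))]
    rw [List.countP_cons, List.countP_cons]
    have hne : ∀ k ∈ d.keys.erase l, k ≠ l := by
      intro k hkmem hkeq
      exact (h.not_mem_erase) (hkeq ▸ hkmem)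
    have hcong : (d.keys.erase l).countP (fun k => decide (n ≤ (d.insert l (d.getD l 0 + 1)).getD k 0))
        = (d.keys.erase l).countP (fun k => decide (n ≤ d.getD k 0)) := by
      apply List.countP_congr
      intro k hkmem
      rw [PySem.Dict.getD_insert]
      simp [hne k hkmem]
    rw [hcong]
    rw [PySem.Dict.getD_insert]
    set c := (d.keys.erase l).countP (fun k => decide (n ≤ d.getD k 0)) with hcdef
    set v := d.getD l 0 with hv
    push_cast
    simp only [decide_eq_true_eq]
    split_ifs <;> omega
  | false =>
    have hk := PySem.Dict.keys_insert_of_not_contains d (d.getD l 0 + 1) hc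
    have hg0 : d.getD l 0 = 0 := PySem.Dict.getD_of_not_contains d 0 hc
    have hnmem : l ∉ d.keys := fun hm => by
      simp [(PySem.Dict.contains_iff_mem_keys d l).mpr hm] at hc
    rw [hk, List.countP_append]
    have hcong : d.keys.countP (fun k => decide (n ≤ (d.insert l (d.getD l 0 + 1)).getD k 0))
        = d.keys.countP (fun k => decide (n ≤ d.getD k 0)) := by
      apply List.countP_congr
      intro k hkmem
      rw [PySem.Dict.getD_insert]
      have : k ≠ l := fun he => hnmem (he ▸ hkmem)
      simp [this]
    rw [hcong, hg0]
    simp only [List.countP_cons, List.countP_nil, PySem.Dict.getD_insert]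
    push_cast
    simp only [decide_eq_true_eq]
    split_ifs <;> omega

-- main invariant: A's fold over the letters is the counter fold paired with the running pvCountGE (needs 1 ≤ n)
theorem pvInv (n : Int) (hn : 1 ≤ n) (ls : List Char) (d : PySem.Dict Char Int) (h : d.keys.Nodup) :
    ls.foldl (pvStepA n) (d, pvCountGE n d) = (ls.foldl pvStepB d, pvCountGE n (ls.foldl pvStepB d)) := by
  induction ls generalizing d with
  | nil => rfl
  | cons l ls ih =>
    simp only [List.foldl_cons]
    have hstep : pvStepA n (d, pvCountGE n d) l = (pvStepB d l, pvCountGE n (pvStepB d l)) := by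
      rw [pvCountGE_step n hn d h l]
      unfold pvStepA pvStepB
      dsimp only
      split_ifs <;> simp
    rw [hstep]
    exact ih (pvStepB d l) (PySem.Dict.nodup_keys_insert d l _ h)

-- A's nested fold (skipping "") equals the fold over the flattened letters
theorem pvFlatten (n : Int) (gs : List String) (st : PySem.Dict Char Int × Int) :
    gs.foldl (fun st g => if g = "" then st
        else (PySem.Set.ofList g.toList).foldl (pvStepA n) st) st
      = (gs.flatMap (fun g => (PySem.Set.ofList g.toList : List Char))).foldl (pvStepA n) st := by
  induction gs generalizing st with
  | nil => rfl
  | cons g gs ih =>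
    simp only [List.foldl_cons, List.flatMap_cons, List.foldl_append]
    by_cases hg : g = ""
    · subst hg
      simp [ih]
    · rw [if_neg hg, ih]

-- A's accumulator never moves when n < 1: every tallied value is positive
theorem pvAccZero (n : Int) (hn : n < 1) (ls : List Char) (d : PySem.Dict Char Int) (acc : Int)
    (hpos : ∀ c : Char, 0 ≤ d.getD c 0) :
    (ls.foldl (pvStepA n) (d, acc)).2 = acc := by
  induction ls generalizing d acc with
  | nil => rfl
  | cons l ls ih =>
    simp only [List.foldl_cons]
    have hv : ¬ (d.getD l 0 + 1 = n) := by have := hpos l; omega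
    have hstep : pvStepA n (d, acc) l = (d.insert l (d.getD l 0 + 1), acc) := by
      unfold pvStepA
      simp [hv]
    rw [hstep]
    apply ih
    intro c
    rw [PySem.Dict.getD_insert]
    split_ifs
    · have := hpos l; omega
    · exact hpos c

-- "".join(gs) is the concatenation of the groups' characters
theorem pvJoinNil (gs : List (List Char)) : PySem.Chars.join [] gs = gs.flatten := by
  induction gs with
  | nil => rfl
  | cons g gs ih =>
    cases gs with
    | nil => simp [PySem.Chars.join, List.intercalate]
    | cons g' gs' =>
      simp only [PySem.Chars.join, List.intercalate] at *
      simp [List.intersperse] at *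
      simpa using ih

-- a letter's tally in A's flattened letter list = number of groups containing it
theorem pvCountEq (c : Char) (gs : List String) :
    (gs.flatMap (fun g => (PySem.Set.ofList g.toList : List Char))).count c
      = gs.countP (fun g => PySem.Chars.isIn [c] g.toList) := by
  induction gs with
  | nil => rfl
  | cons g gs ih =>
    simp only [List.flatMap_cons, List.count_append, List.countP_cons, ih]
    have hin : PySem.Chars.isIn [c] g.toList = decide (c ∈ g.toList) := by
      by_cases hm : c ∈ g.toList
      · simp [hm, PySem.Chars.isIn_iff_infix, (List.singleton_infix_iff c g.toList).mpr hm]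
      · simp only [hm, decide_false]
        rw [PySem.Chars.isIn_eq_false_iff]
        exact fun hinf => hm ((List.singleton_infix_iff c g.toList).mp hinf)
    have hcnt : (PySem.Set.ofList g.toList : List Char).count c = if c ∈ g.toList then 1 else 0 := by
      by_cases hm : c ∈ g.toList
      · rw [if_pos hm]
        exact List.count_eq_one_of_mem (PySem.Set.nodup_ofList g.toList)
          ((PySem.Set.mem_ofList _ _).mpr hm)
      · rw [if_neg hm]
        exact List.count_eq_zero.mpr (fun hmem => hm ((PySem.Set.mem_ofList _ _).mp hmem))
    rw [hin, hcnt]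
    by_cases hm : c ∈ g.toList
    · simp [hm]; omega
    · simp [hm]

-- B's outer fold is a countP (propositional if bridged to foldl_count_if)
theorem pvFoldB (n : Int) (gs : List String) (ls : List Char) :
    ls.foldl (fun (acc : Int) letter =>
        if n ≤ gs.foldl (fun (c : Int) group => if PySem.Chars.isIn [letter] group.toList then c + 1 else c) 0
        then acc + 1 else acc) 0
      = (ls.countP (fun letter => decide (n ≤ gs.foldl
          (fun (c : Int) group => if PySem.Chars.isIn [letter] group.toList then c + 1 else c) 0)) : Int) := by
  simpa using PySem.List.foldl_count_if (fun letter => decide (n ≤ gs.foldl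
    (fun (c : Int) group => if PySem.Chars.isIn [letter] group.toList then c + 1 else c) 0)) ls 0

theorem pvFinal (s : String) : all_answered s = all_answered_alt s := by
  unfold all_answered all_answered_alt
  set groups := (PySem.Str.split? s " ").getD [] with hg
  set n : Int := (groups.length : Int) - 1 with hndef
  set letters := groups.flatMap (fun g => (PySem.Set.ofList g.toList : List Char)) with hl
  have hA : groups.foldl (fun (st : PySem.Dict Char Int × Int) group =>
        if group = "" then st
        else (PySem.Set.ofList group.toList).foldl (fun st letter =>
          let v := st.1.getD letter 0 + 1
          (st.1.insert letter v, if v = n then st.2 + 1 else st.2)) st)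
      (PySem.Dict.empty, 0)
      = letters.foldl (pvStepA n) (PySem.Dict.empty, 0) := pvFlatten n groups _
  dsimp only
  rw [hA]
  by_cases hlt : n < 1
  · rw [if_pos hlt]
    exact pvAccZero n hlt letters PySem.Dict.empty 0 (fun c => by rw [PySem.Dict.getD_empty])
  · rw [if_neg hlt]
    -- A's side: acc = number of distinct letters of `letters` whose tally is ≥ n
    have h0 : pvCountGE n (PySem.Dict.empty : PySem.Dict Char Int) = 0 := rfl
    have hinv := pvInv n (by omega) letters PySem.Dict.empty PySem.Dict.nodup_keys_empty
    rw [h0] at hinv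
    rw [hinv]
    have hcounter : letters.foldl pvStepB PySem.Dict.empty = PySem.Dict.counter letters := rfl
    rw [hcounter, pvCountGE_eq_countP n _ (by rw [PySem.Dict.keys_counter]; exact PySem.Set.nodup_ofList letters)]
    -- B's side: fold = countP over the distinct letters of the joined string
    dsimp only
    rw [← hndef, pvFoldB n groups]
    -- identify the predicate on both sides, and the two nodup letter lists up to permutation
    have hpred : ∀ c : Char,
        (decide (n ≤ (PySem.Dict.counter letters).getD c 0))
          = decide (n ≤ groups.foldl
              (fun (acc : Int) group => if PySem.Chars.isIn [c] group.toList then acc + 1 else acc) 0) := by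
      intro c
      rw [PySem.Dict.getD_counter, pvCountEq c groups,
        PySem.List.foldl_count_if (fun group : String => PySem.Chars.isIn [c] group.toList) groups 0, zero_add]
    have hkeys : (PySem.Dict.counter letters).keys = PySem.Set.ofList letters :=
      PySem.Dict.keys_counter letters
    have hjoin : (PySem.Str.join "" groups).toList = groups.flatMap (·.toList) := by
      simp only [PySem.Str.join, String.toList_empty, String.toList_ofList]
      rw [pvJoinNil]
      simp [List.flatMap_def]
    have hperm : (PySem.Set.ofList letters : List Char).Perm
        (PySem.Set.ofList (PySem.Str.join "" groups).toList) := by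
      apply (List.perm_ext_iff_of_nodup (PySem.Set.nodup_ofList _) (PySem.Set.nodup_ofList _)).mpr
      intro c
      rw [PySem.Set.mem_ofList, PySem.Set.mem_ofList, hjoin, hl]
      simp only [List.mem_flatMap]
      constructor
      · rintro ⟨g, hgmem, hcm⟩
        exact ⟨g, hgmem, (PySem.Set.mem_ofList _ _).mp hcm⟩
      · rintro ⟨g, hgmem, hcm⟩
        exact ⟨g, hgmem, (PySem.Set.mem_ofList _ _).mpr hcm⟩
    have hC : (PySem.Dict.counter letters).keys.countP (fun k => decide (n ≤ (PySem.Dict.counter letters).getD k 0))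
        = (PySem.Set.ofList (PySem.Str.join "" groups).toList : List Char).countP
            (fun c => decide (n ≤ groups.foldl
              (fun (acc : Int) group => if PySem.Chars.isIn [c] group.toList then acc + 1 else acc) 0)) := by
      rw [hkeys, ← hperm.countP_eq]
      exact List.countP_congr (fun c _ => by rw [hpred c])
    exact_mod_cast hC

-- ===== VERDICT (by name: the statement is the Claim_ definition above) =====
theorem all_answered_spec : Claim_equal_all_answered := fun s _ => pvFinal s
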